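-- pv_equiv track=rewrite | github.com/gvardoyan/QuantumNetworkCapacity | brute_force/computeSnapshotCap.py | getPathsDisjointWithPathSet
-- ===== SOURCE A (Python) =====
-- def getPathsDisjointWithPathSet(pathSet,paths,disjointInfo):
--   disjPaths = list()
--   # don't need to look at paths that are already in pathSet
--   allPaths = range(0,len(paths))
--   relPaths = [p for p in allPaths if p not in pathSet]
--   for pIdx in relPaths:
--     pIsDisj = 1
--     for dpIdx in pathSet:
--       if pIdx != dpIdx:
--         # the smaller idx always comes first in the dict
--         idx1 = min(pIdx,dpIdx)
--         idx2 = max(pIdx,dpIdx)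
--         if disjointInfo[idx1,idx2] == 0:
--           pIsDisj = 0
--           break
--     if pIsDisj == 1:
--       disjPaths.append(pIdx)
--
--   return disjPaths
-- ===== SOURCE B (Python) =====
-- def getPathsDisjointWithPathSet(pathSet, paths, disjointInfo):
--     inSet = set(pathSet)
--     survivors = [p for p in range(len(paths)) if p not in inSet]
--     for dpIdx in pathSet:
--         survivors = [p for p in survivors
--                      if disjointInfo[min(p, dpIdx), max(p, dpIdx)] != 0]
--     return survivors
-- ===== Notes on version B (the rewrite author's own statement) =====
-- stated objective: alternative
-- what changed: Loop inversion: instead of testing each candidate against all of pathSet with an inner break, B builds the survivor list once and then, for each pathSet member, filters the survivors in one pass; the per-candidate inner loop and the pIdx!=dpIdx guard disappear.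
-- outside the precondition, e.g. on getPathsDisjointWithPathSet([0, 1], [5, 5, 5], {(0, 2): 0}): A returns [], B returns []
import Mathlib
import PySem

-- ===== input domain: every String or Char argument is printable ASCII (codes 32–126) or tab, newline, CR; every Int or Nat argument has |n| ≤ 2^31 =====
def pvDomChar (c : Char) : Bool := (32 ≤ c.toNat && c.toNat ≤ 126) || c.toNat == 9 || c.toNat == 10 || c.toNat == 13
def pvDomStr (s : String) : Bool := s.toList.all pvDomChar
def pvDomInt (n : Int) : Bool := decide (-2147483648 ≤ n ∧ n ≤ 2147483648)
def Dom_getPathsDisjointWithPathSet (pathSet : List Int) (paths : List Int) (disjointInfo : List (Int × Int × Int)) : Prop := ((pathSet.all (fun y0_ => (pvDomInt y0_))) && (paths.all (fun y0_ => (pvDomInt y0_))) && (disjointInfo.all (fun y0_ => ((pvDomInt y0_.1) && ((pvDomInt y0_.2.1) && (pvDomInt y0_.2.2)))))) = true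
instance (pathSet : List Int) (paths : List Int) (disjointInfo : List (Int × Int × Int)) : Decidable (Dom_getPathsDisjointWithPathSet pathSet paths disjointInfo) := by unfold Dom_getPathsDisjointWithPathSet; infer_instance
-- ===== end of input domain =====

-- B inverts the loops: build the survivor list once, then filter it once per pathSet member
-- (alternative decomposition, same cost; keys missing from disjointInfo are excluded by Pre_).

-- dict[(i,j)] lookup on the association list (first match; keys of a Python dict are unique)
def pvLookup (di : List (Int × Int × Int)) (k1 k2 : Int) : Option Int :=
  (di.find? (fun t => t.1 == k1 && t.2.1 == k2)).map (fun t => t.2.2)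

-- ===== PORT A =====
-- inner 'for dpIdx in pathSet' loop of A, with the break as an early return of pIsDisj = 0
-- (missing key → getD 0, which Pre_ keeps out of the claimed domain; Python raises KeyError there)
def pvDisjA (di : List (Int × Int × Int)) (pIdx : Int) : List Int → Int
  | [] => 1
  | dpIdx :: rest =>
    if pIdx ≠ dpIdx then
      if (pvLookup di (min pIdx dpIdx) (max pIdx dpIdx)).getD 0 == 0 then 0
      else pvDisjA di pIdx rest
    else pvDisjA di pIdx rest

def getPathsDisjointWithPathSet (pathSet : List Int) (paths : List Int) (disjointInfo : List (Int × Int × Int)) : List Int :=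
  let relPaths := (PySem.List.pyRange 0 (paths.length : Int) 1).filter (fun p => !(pathSet.contains p))
  relPaths.foldl (fun disjPaths pIdx => if pvDisjA disjointInfo pIdx pathSet == 1 then disjPaths ++ [pIdx] else disjPaths) []

-- ===== PORT B =====
def getPathsDisjointWithPathSet_alt (pathSet : List Int) (paths : List Int) (disjointInfo : List (Int × Int × Int)) : List Int :=
  let survivors := (PySem.List.pyRange 0 (paths.length : Int) 1).filter (fun p => !(pathSet.contains p))
  pathSet.foldl (fun surv dpIdx => surv.filter (fun p => (pvLookup disjointInfo (min p dpIdx) (max p dpIdx)).getD 0 != 0)) survivors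

-- ===== PRECONDITION & SPEC =====
-- Python A raises KeyError when a looked-up pair key is absent from disjointInfo. Pre_ requires
-- every candidate/pathSet pair key to be present; this is slightly narrower than A's exact return
-- domain because A's early break can return without touching later (possibly missing) keys — on
-- such excluded inputs A and B still return the same value (B skips those lookups too).
def Pre_getPathsDisjointWithPathSet (pathSet : List Int) (paths : List Int) (disjointInfo : List (Int × Int × Int)) : Prop :=
  ∀ p ∈ PySem.List.pyRange 0 (paths.length : Int) 1, p ∉ pathSet →
    ∀ d ∈ pathSet, (pvLookup disjointInfo (min p d) (max p d)).isSome = true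
instance (pathSet : List Int) (paths : List Int) (disjointInfo : List (Int × Int × Int)) : Decidable (Pre_getPathsDisjointWithPathSet pathSet paths disjointInfo) := by unfold Pre_getPathsDisjointWithPathSet; infer_instance
def pvWitness_getPathsDisjointWithPathSet : List Int × List Int × (List (Int × Int × Int)) := ([0], [7, 7], [(0, 1, 1)])

def Spec_getPathsDisjointWithPathSet (pathSet : List Int) (paths : List Int) (disjointInfo : List (Int × Int × Int)) (out : List Int) : Prop := out = getPathsDisjointWithPathSet_alt pathSet paths disjointInfo
instance (pathSet : List Int) (paths : List Int) (disjointInfo : List (Int × Int × Int)) (out : List Int) : Decidable (Spec_getPathsDisjointWithPathSet pathSet paths disjointInfo out) := by unfold Spec_getPathsDisjointWithPathSet; infer_instance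

-- ===== CLAIM (what is proved, stated in full; the proofs are below) =====
def Claim_equal_getPathsDisjointWithPathSet : Prop := ∀ (pathSet : List Int) (paths : List Int) (disjointInfo : List (Int × Int × Int)), Dom_getPathsDisjointWithPathSet pathSet paths disjointInfo → Pre_getPathsDisjointWithPathSet pathSet paths disjointInfo → Spec_getPathsDisjointWithPathSet pathSet paths disjointInfo (getPathsDisjointWithPathSet pathSet paths disjointInfo)

-- ===== LEMMAS AND PROOFS =====

theorem pvWitness_ok : Dom_getPathsDisjointWithPathSet pvWitness_getPathsDisjointWithPathSet.1 pvWitness_getPathsDisjointWithPathSet.2.1 pvWitness_getPathsDisjointWithPathSet.2.2 ∧ Pre_getPathsDisjointWithPathSet pvWitness_getPathsDisjointWithPathSet.1 pvWitness_getPathsDisjointWithPathSet.2.1 pvWitness_getPathsDisjointWithPathSet.2.2 := by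
  decide

-- sequential filtering (B's outer loop) = one filter by the conjunction over pathSet
theorem foldl_filter_eq_filter_all (q : Int → Int → Bool) (ds : List Int) (init : List Int) :
    ds.foldl (fun s d => s.filter (q d)) init = init.filter (fun p => ds.all (fun d => q d p)) := by
  induction ds generalizing init with
  | nil => simp
  | cons d rest ih =>
    simp only [List.foldl_cons, ih, List.filter_filter, List.all_cons]
    congr 1
    funext a
    rw [Bool.and_comm]

-- A's inner loop returns 1 exactly when every lookup along pathSet is nonzero (p outside pathSet)
theorem pvDisjA_eq_all (di : List (Int × Int × Int)) (p : Int) (pathSet : List Int) (hp : p ∉ pathSet) :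
    (pvDisjA di p pathSet == 1) = pathSet.all (fun d => (pvLookup di (min p d) (max p d)).getD 0 != 0) := by
  induction pathSet with
  | nil => rfl
  | cons d rest ih =>
    have hpd : p ≠ d := fun h => hp (h ▸ List.mem_cons_self ..)
    have hpr : p ∉ rest := fun h => hp (List.mem_cons_of_mem _ h)
    simp only [pvDisjA, if_pos hpd, List.all_cons]
    by_cases h0 : (pvLookup di (min p d) (max p d)).getD 0 = 0
    · simp [h0]
    · simp [h0, ih hpr]

-- ===== VERDICT (by name: the statement is the Claim_ definition above) =====
theorem getPathsDisjointWithPathSet_spec : Claim_equal_getPathsDisjointWithPathSet := by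
  intro pathSet paths disjointInfo _ _
  unfold Spec_getPathsDisjointWithPathSet getPathsDisjointWithPathSet getPathsDisjointWithPathSet_alt
  rw [foldl_filter_eq_filter_all, PySem.List.foldl_append_if_eq_filter, List.nil_append]
  apply List.filter_congr
  intro p hp
  have hmem : p ∉ pathSet := by
    have := List.of_mem_filter hp
    simpa using this
  exact pvDisjA_eq_all disjointInfo p pathSet hmem
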